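-- pv_equiv track=rewrite | github.com/Kirill152251/python-practise | algorithms/two_pointers.py | largest_subarray_sum
-- ===== SOURCE A (Python) =====
-- def largest_subarray_sum(arr: list, size: int) -> int:
--     if size >= len(arr):
--         return sum(arr)
--     left, right = 0, size - 1
--     m = 0
--     while right != len(arr):
--         window = arr[left:right + 1]
--         window_sum = sum(window)
--         m = max(m, window_sum)
--         left += 1; right += 1
--     return m
-- ===== SOURCE B (Python) =====
-- def largest_subarray_sum(arr: list, size: int) -> int:
--     n = len(arr)
--     if size >= n:
--         return sum(arr)
--     s = sum(arr[:size])
--     best = s if s > 0 else 0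
--     for i in range(size, n):
--         s += arr[i] - arr[i - size]
--         if s > best:
--             best = s
--     return best
-- ===== Notes on version B (the rewrite author's own statement) =====
-- stated objective: faster
-- what changed: replaces re-summing each window slice from scratch (O(n*size)) with a sliding window that updates one running sum by adding the entering and subtracting the leaving element (O(n))
-- outside the precondition, e.g. on largest_subarray_sum([5, 5, 5], -1): A returns 10, B raises IndexError
import Mathlib
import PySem

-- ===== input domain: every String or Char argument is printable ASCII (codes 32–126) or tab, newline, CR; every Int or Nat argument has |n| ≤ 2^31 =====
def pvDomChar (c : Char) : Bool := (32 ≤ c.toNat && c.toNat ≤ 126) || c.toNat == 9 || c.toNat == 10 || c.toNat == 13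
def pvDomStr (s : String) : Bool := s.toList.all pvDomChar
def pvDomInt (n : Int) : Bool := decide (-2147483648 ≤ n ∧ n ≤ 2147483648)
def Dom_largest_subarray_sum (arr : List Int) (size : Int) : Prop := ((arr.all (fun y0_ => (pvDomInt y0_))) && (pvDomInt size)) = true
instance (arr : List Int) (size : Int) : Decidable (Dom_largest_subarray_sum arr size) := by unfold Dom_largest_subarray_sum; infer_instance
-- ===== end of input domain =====

-- B replaces A's per-window slice-and-sum (O(n*size)) with a sliding window updating one running sum (O(n)).


-- ===== PORT A =====
-- while right != len(arr): window = arr[left:right+1]; m = max(m, sum(window)); left += 1; right += 1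
def pvALoop (arr : List Int) : Int → Int → Int → Nat → Int
  | _, _, m, 0 => m
  | left, right, m, fuel+1 =>
    if right = (arr.length : Int) then m
    else
      let window := PySem.List.slice arr (some left) (some (right + 1))
      let window_sum := window.sum
      pvALoop arr (left + 1) (right + 1) (max m window_sum) fuel

def largest_subarray_sum (arr : List Int) (size : Int) : Int :=
  if size ≥ (arr.length : Int) then arr.sum
  else pvALoop arr 0 (size - 1) 0 ((arr.length : Int) - size + 2).toNat

-- ===== PORT B =====
def largest_subarray_sum_alt (arr : List Int) (size : Int) : Int :=
  let n : Int := arr.length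
  if size ≥ n then arr.sum
  else
    let s0 := (PySem.List.slice arr none (some size)).sum
    let best0 := if s0 > 0 then s0 else 0
    let p := (PySem.List.pyRange size n 1).foldl
      (fun (p : Int × Int) i =>
        let s := p.1 + PySem.List.pyGetD arr i 0 - PySem.List.pyGetD arr (i - size) 0
        (s, if s > p.2 then s else p.2)) (s0, best0)
    p.2

-- ===== PRECONDITION & SPEC =====
-- Pre_ excludes negative size, outside the natural domain of a fixed-size-window maximum: there A's
-- windows come from Python's negative-slice clamping and no implementation's value would be specified;
-- B itself raises IndexError on every negative size with size < len(arr).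
def Pre_largest_subarray_sum (arr : List Int) (size : Int) : Prop := 0 ≤ size
instance (arr : List Int) (size : Int) : Decidable (Pre_largest_subarray_sum arr size) := by unfold Pre_largest_subarray_sum; infer_instance
def pvWitness_largest_subarray_sum : List Int × Int := ([1, -2, 3, 4], 2)

def Spec_largest_subarray_sum (arr : List Int) (size : Int) (out : Int) : Prop := out = largest_subarray_sum_alt arr size
instance (arr : List Int) (size : Int) (out : Int) : Decidable (Spec_largest_subarray_sum arr size out) := by unfold Spec_largest_subarray_sum; infer_instance

-- ===== CLAIM (what is proved, stated in full; the proofs are below) =====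
def Claim_equal_largest_subarray_sum : Prop := ∀ (arr : List Int) (size : Int), Dom_largest_subarray_sum arr size → Pre_largest_subarray_sum arr size → Spec_largest_subarray_sum arr size (largest_subarray_sum arr size)

-- ===== LEMMAS AND PROOFS =====

-- sum of the window of length k starting at j
def pvWS (arr : List Int) (k j : Nat) : Int := ((arr.drop j).take k).sum

-- common reference computation: fold max over c consecutive windows starting at j
def pvWinMax (arr : List Int) (k : Nat) : Nat → Nat → Int → Int
  | _, 0, m => m
  | j, c+1, m => pvWinMax arr k (j+1) c (max m (pvWS arr k j))

lemma pv_if_max (x b : Int) : (if x > b then x else b) = max b x := by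
  split_ifs with h <;> omega

lemma pv_slide (arr : List Int) (k j : Nat) (h2 : j + k < arr.length) :
    pvWS arr k (j+1) = pvWS arr k j + arr.getD (j+k) 0 - arr.getD j 0 := by
  cases k with
  | zero => simp [pvWS]
  | succ m =>
  have hj : j < arr.length := by omega
  have hjk : j + (m + 1) < arr.length := h2
  have hWSj : pvWS arr (m+1) j = arr[j] + ((arr.drop (j+1)).take m).sum := by
    rw [pvWS, List.drop_eq_getElem_cons hj, List.take_succ_cons, List.sum_cons]
  have hget : (arr.drop (j+1))[m]? = some arr[j + (m+1)] := by
    rw [List.getElem?_drop]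
    rw [List.getElem?_eq_getElem (by omega)]
    congr 1
    congr 1
    omega
  have hWSj1 : pvWS arr (m+1) (j+1) = ((arr.drop (j+1)).take m).sum + arr[j + (m+1)] := by
    simp [pvWS, List.take_succ, hget]
  have hg1 : arr.getD (j + (m+1)) 0 = arr[j + (m+1)] := List.getD_eq_getElem _ _ hjk
  have hg2 : arr.getD j 0 = arr[j] := List.getD_eq_getElem _ _ hj
  rw [hWSj1, hWSj, hg1, hg2]; ring

lemma pv_aloop_eq (arr : List Int) (k : Nat) :
    ∀ (c : Nat) (j : Nat) (m : Int) (fuel : Nat), c ≤ fuel → j + c = arr.length + 1 - k →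
      k ≤ arr.length + 1 →
      pvALoop arr (j : Int) ((j : Int) + (k : Int) - 1) m fuel = pvWinMax arr k j c m := by
  intro c
  induction c with
  | zero =>
    intro j m fuel _ hj hkn
    have hr : ((j : Int) + (k : Int) - 1) = (arr.length : Int) := by omega
    cases fuel with
    | zero => simp [pvALoop, pvWinMax]
    | succ f => simp [pvALoop, pvWinMax, hr]
  | succ c ih =>
    intro j m fuel hf hj hkn
    obtain ⟨f, rfl⟩ : ∃ f, fuel = f + 1 := ⟨fuel - 1, by omega⟩
    have hr : ((j : Int) + (k : Int) - 1) ≠ (arr.length : Int) := by omega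
    rw [pvALoop, if_neg hr]
    have hslice : PySem.List.slice arr (some (j : Int)) (some ((j : Int) + (k : Int) - 1 + 1))
        = (arr.drop j).take k := by
      have : ((j : Int) + (k : Int) - 1 + 1) = (j : Int) + (k : Int) := by ring
      rw [this]
      exact PySem.List.slice_natCast_add arr j k
    have h1 : ((j : Int) + 1) = ((j + 1 : Nat) : Int) := by push_cast; ring
    have h2 : ((j : Int) + (k : Int) - 1 + 1) = ((j + 1 : Nat) : Int) + (k : Int) - 1 := by push_cast; ring
    rw [hslice, h2, h1]
    rw [ih (j+1) _ f (by omega) (by omega) hkn]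
    rfl

lemma pv_bloop_eq (arr : List Int) (k : Nat) (hkn : k < arr.length) :
    ∀ (c : Nat) (j : Nat) (b : Int), j + c = arr.length - k →
      (PySem.List.pyRange ((j + k : Nat) : Int) (arr.length : Int) 1).foldl
        (fun (p : Int × Int) i =>
          (p.1 + PySem.List.pyGetD arr i 0 - PySem.List.pyGetD arr (i - (k : Int)) 0,
           if p.1 + PySem.List.pyGetD arr i 0 - PySem.List.pyGetD arr (i - (k : Int)) 0 > p.2
           then p.1 + PySem.List.pyGetD arr i 0 - PySem.List.pyGetD arr (i - (k : Int)) 0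
           else p.2)) (pvWS arr k j, max b (pvWS arr k j))
      = (pvWS arr k (arr.length - k), pvWinMax arr k j (c+1) b) := by
  intro c
  induction c with
  | zero =>
    intro j b hj
    have hjeq : j = arr.length - k := by omega
    subst hjeq
    have hnil : PySem.List.pyRange ((arr.length - k + k : Nat) : Int) (arr.length : Int) 1 = [] :=
      PySem.List.pyRange_one_eq_nil (by omega)
    rw [hnil]
    simp [pvWinMax]
  | succ c ih =>
    intro j b hj
    have hlt : ((j + k : Nat) : Int) < (arr.length : Int) := by omega
    rw [PySem.List.pyRange_one_cons hlt]
    rw [List.foldl_cons]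
    have hjk : j + k < arr.length := by omega
    have hg1 : PySem.List.pyGetD arr ((j + k : Nat) : Int) 0 = arr.getD (j + k) 0 :=
      PySem.List.pyGetD_natCast arr (j+k) 0
    have hsub : ((j + k : Nat) : Int) - (k : Int) = ((j : Nat) : Int) := by push_cast; ring
    have hg2 : PySem.List.pyGetD arr (((j + k : Nat) : Int) - (k : Int)) 0 = arr.getD j 0 := by
      rw [hsub]; exact PySem.List.pyGetD_natCast arr j 0
    have hs : pvWS arr k j + PySem.List.pyGetD arr ((j + k : Nat) : Int) 0
        - PySem.List.pyGetD arr (((j + k : Nat) : Int) - (k : Int)) 0 = pvWS arr k (j+1) := by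
      rw [hg1, hg2, pv_slide arr k j hjk]
    simp only [hs]
    rw [show (if pvWS arr k (j+1) > max b (pvWS arr k j) then pvWS arr k (j+1)
          else max b (pvWS arr k j)) = max (max b (pvWS arr k j)) (pvWS arr k (j+1)) from
      pv_if_max _ _]
    have h1 : ((j + k : Nat) : Int) + 1 = (((j + 1) + k : Nat) : Int) := by push_cast; ring
    rw [h1, ih (j+1) (max b (pvWS arr k j)) (by omega)]
    rfl

-- ===== VERDICT (by name: the statement is the Claim_ definition above) =====
theorem largest_subarray_sum_spec : Claim_equal_largest_subarray_sum := by
  intro arr size _ hpre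
  unfold Spec_largest_subarray_sum largest_subarray_sum largest_subarray_sum_alt
  by_cases hge : size ≥ (arr.length : Int)
  · rw [if_pos hge, if_pos hge]
  · rw [if_neg hge, if_neg hge]
    have h0 : (0 : Int) ≤ size := hpre
    obtain ⟨k, hks⟩ : ∃ k : Nat, size = (k : Int) := ⟨size.toNat, (Int.toNat_of_nonneg h0).symm⟩
    have hkn : k < arr.length := by omega
    subst hks
    have hA : pvALoop arr 0 ((k : Int) - 1) 0 ((arr.length : Int) - (k : Int) + 2).toNat
        = pvWinMax arr k 0 (arr.length + 1 - k) 0 := by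
      have := pv_aloop_eq arr k (arr.length + 1 - k) 0 0
        ((arr.length : Int) - (k : Int) + 2).toNat (by omega) (by omega) (by omega)
      simpa using this
    have hs0 : (PySem.List.slice arr none (some (k : Int))).sum = pvWS arr k 0 := by
      rw [PySem.List.slice_to_natCast]
      simp [pvWS]
    have hb0 : (if pvWS arr k 0 > 0 then pvWS arr k 0 else 0) = max 0 (pvWS arr k 0) :=
      pv_if_max _ 0
    have hB := pv_bloop_eq arr k hkn (arr.length - k) 0 0 (by omega)
    simp only [Nat.zero_add] at hB
    rw [hA]
    simp only [hs0, hb0]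
    rw [hB]
    have hc : arr.length + 1 - k = (arr.length - k) + 1 := by omega
    rw [hc]
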